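-- pv_equiv track=rewrite | github.com/hargon24/Context_aware_NMT | document_utilities.py | sort_pretrain_batch
-- ===== SOURCE A (Python) =====
-- def sort_pretrain_batch(pool, batch_size):
--     batch = list()
--     batch_pool = list()
--     for pair in sorted(pool, key=lambda x:len(x[1]), reverse=True):
--         batch.append(pair)
--         if len(batch) == batch_size:
--             source_batch = list()
--             target_batch = list()
--             for ssent, tsent in batch:
--                 source_batch.append(ssent)
--                 target_batch.append(tsent)
--
--             batch_pool.append((source_batch, target_batch))
--             batch = list()
--
--     if len(batch) > 0:
--         source_batch = list()
--         target_batch = list()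
--         for ssent, tsent in batch:
--             source_batch.append(ssent)
--             target_batch.append(tsent)
--
--         batch_pool.append((source_batch, target_batch))
--         batch = list()
--
--     return batch_pool
-- ===== SOURCE B (Python) =====
-- def sort_pretrain_batch(pool, batch_size):
--     rest = sorted(pool, key=lambda x: len(x[1]), reverse=True)
--     batch_pool = []
--     while rest:
--         chunk, rest = rest[:batch_size], rest[batch_size:]
--         sources, targets = zip(*chunk)
--         batch_pool.append((list(sources), list(targets)))
--     return batch_pool
-- ===== Notes on version B (the rewrite author's own statement) =====
-- stated objective: simpler
-- what changed: replaces A's element-by-element accumulator with flush-on-count and a duplicated tail-flush block by sorting once and repeatedly slicing off the next batch_size-sized chunk and transposing it with zip(*...)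
-- outside the precondition, e.g. on sort_pretrain_batch([([1], [2])], 0): A returns [([[1]], [[2]])], B raises ValueError; on sort_pretrain_batch([([1], [2])], -1): A returns [([[1]], [[2]])], B raises ValueError
import Mathlib
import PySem

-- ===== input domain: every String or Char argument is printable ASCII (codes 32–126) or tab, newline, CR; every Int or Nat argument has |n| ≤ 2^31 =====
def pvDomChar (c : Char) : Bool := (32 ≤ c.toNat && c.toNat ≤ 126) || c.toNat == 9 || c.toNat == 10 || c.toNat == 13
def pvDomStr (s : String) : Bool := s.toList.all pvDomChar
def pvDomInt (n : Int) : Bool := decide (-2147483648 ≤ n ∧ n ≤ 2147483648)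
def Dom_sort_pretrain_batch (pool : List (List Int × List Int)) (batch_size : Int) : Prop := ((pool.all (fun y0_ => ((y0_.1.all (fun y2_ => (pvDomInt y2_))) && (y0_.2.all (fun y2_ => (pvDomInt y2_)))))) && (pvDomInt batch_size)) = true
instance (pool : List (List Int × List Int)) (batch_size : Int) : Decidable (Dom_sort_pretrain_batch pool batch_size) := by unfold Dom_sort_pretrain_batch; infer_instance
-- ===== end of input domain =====

-- B sorts once, then repeatedly slices off the next batch_size-sized chunk and transposes it,
-- instead of A's element-by-element accumulator with flush-on-count and duplicated tail flush.

-- ===== PORT A =====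
-- A's inner 'for ssent, tsent in batch' loop building source_batch/target_batch by appends
def pvUnzipA (batch : List (List Int × List Int)) : List (List Int) × List (List Int) :=
  batch.foldl (fun s p => (s.1 ++ [p.1], s.2 ++ [p.2])) ([], [])

-- A's loop body: append pair to batch; flush when len(batch) == batch_size
def pvStepA (batch_size : Int)
    (s : List (List Int × List Int) × List (List (List Int) × List (List Int)))
    (pair : List Int × List Int) :
    List (List Int × List Int) × List (List (List Int) × List (List Int)) :=
  let batch := s.1 ++ [pair]
  if (batch.length : Int) = batch_size then ([], s.2 ++ [pvUnzipA batch]) else (batch, s.2)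

def sort_pretrain_batch (pool : List (List Int × List Int)) (batch_size : Int) :
    List (List (List Int) × List (List Int)) :=
  let st := (PySem.List.sorted pool (fun x => ((x.2.length : Int))) true).foldl
      (pvStepA batch_size) ([], [])
  if 0 < st.1.length then st.2 ++ [pvUnzipA st.1] else st.2

-- ===== PORT B =====
-- Source B's while loop: slice off rest[:batch_size], transpose with zip(* ) (exact for pairs),
-- continue on rest[batch_size:].  Fuel = initial length, only to make the recursion total;
-- it never runs out when batch_size ≥ 1 (Pre_).
def pvChunkLoop : Nat → Int → List (List Int × List Int) →
    List (List (List Int) × List (List Int)) → List (List (List Int) × List (List Int))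
  | 0, _, _, acc => acc
  | f + 1, bs, rest, acc =>
    if rest = [] then acc
    else
      let chunk := PySem.List.slice rest (some 0) (some bs)
      pvChunkLoop f bs (PySem.List.slice rest (some bs) none)
        (acc ++ [(chunk.map Prod.fst, chunk.map Prod.snd)])

def sort_pretrain_batch_alt (pool : List (List Int × List Int)) (batch_size : Int) :
    List (List (List Int) × List (List Int)) :=
  let rest := PySem.List.sorted pool (fun x => ((x.2.length : Int))) true
  pvChunkLoop rest.length batch_size rest []

-- ===== PRECONDITION & SPEC =====
-- Pre_ restricts to the natural domain batch_size ≥ 1: on batch_size ≤ 0 A accidentally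
-- returns everything as one giant batch while B's slicing raises ValueError.
def Pre_sort_pretrain_batch (pool : List (List Int × List Int)) (batch_size : Int) : Prop :=
  1 ≤ batch_size
instance (pool : List (List Int × List Int)) (batch_size : Int) : Decidable (Pre_sort_pretrain_batch pool batch_size) := by unfold Pre_sort_pretrain_batch; infer_instance

def pvWitness_sort_pretrain_batch : (List (List Int × List Int)) × Int :=
  ([([1], [2]), ([3], [4, 5]), ([6], [])], 2)

def Spec_sort_pretrain_batch (pool : List (List Int × List Int)) (batch_size : Int) (out : List (List (List Int) × List (List Int))) : Prop := out = sort_pretrain_batch_alt pool batch_size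
instance (pool : List (List Int × List Int)) (batch_size : Int) (out : List (List (List Int) × List (List Int))) : Decidable (Spec_sort_pretrain_batch pool batch_size out) := by unfold Spec_sort_pretrain_batch; infer_instance

-- ===== CLAIM (what is proved, stated in full; the proofs are below) =====
def Claim_equal_sort_pretrain_batch : Prop := ∀ (pool : List (List Int × List Int)) (batch_size : Int), Dom_sort_pretrain_batch pool batch_size → Pre_sort_pretrain_batch pool batch_size → Spec_sort_pretrain_batch pool batch_size (sort_pretrain_batch pool batch_size)

-- ===== LEMMAS AND PROOFS =====

-- common reference chunking: take m / drop m until empty (m ≥ 1 in all uses)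
def pvChunks (m : Nat) (l : List (List Int × List Int)) :
    List (List (List Int) × List (List Int)) :=
  if h : l = [] ∨ m = 0 then []
  else ((l.take m).map Prod.fst, (l.take m).map Prod.snd) :: pvChunks m (l.drop m)
termination_by l.length
decreasing_by
  rw [not_or] at h
  have hl : 0 < l.length := List.length_pos_iff.mpr h.1
  simp only [List.length_drop]
  omega

theorem pvUnzipA_go (b : List (List Int × List Int))
    (s : List (List Int) × List (List Int)) :
    b.foldl (fun s p => (s.1 ++ [p.1], s.2 ++ [p.2])) s
      = (s.1 ++ b.map Prod.fst, s.2 ++ b.map Prod.snd) := by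
  induction b generalizing s with
  | nil => simp
  | cons x t ih => simp [List.foldl_cons, ih]

theorem pvUnzipA_eq (b : List (List Int × List Int)) :
    pvUnzipA b = (b.map Prod.fst, b.map Prod.snd) := by
  simp [pvUnzipA, pvUnzipA_go]

-- A's fold never flushes while the batch stays short
theorem pvA_no_flush (bs : Int) (n : Nat) (hn : (n : Int) = bs) :
    ∀ (l b : List (List Int × List Int)) bp, b.length + l.length < n →
      l.foldl (pvStepA bs) (b, bp) = (b ++ l, bp) := by
  intro l
  induction l with
  | nil => intro b bp _; simp
  | cons x t ih =>
    intro b bp h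
    have hne : ((b ++ [x]).length : Int) ≠ bs := by
      rw [← hn]
      simp only [List.length_append, List.length_cons, List.length_nil] at *
      omega
    simp only [List.foldl_cons, pvStepA, if_neg hne]
    rw [ih (b ++ [x]) bp (by simp at h ⊢; omega)]
    simp

-- A's fold flushes exactly after consuming the k elements that complete the batch
theorem pvA_flush (bs : Int) (n : Nat) (hn : (n : Int) = bs) :
    ∀ (k : Nat) (l b : List (List Int × List Int)) bp, 1 ≤ k → b.length + k = n →
      k ≤ l.length →
      l.foldl (pvStepA bs) (b, bp)
        = (l.drop k).foldl (pvStepA bs) ([], bp ++ [pvUnzipA (b ++ l.take k)]) := by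
  intro k
  induction k with
  | zero => intro _ _ _ h; omega
  | succ k ih =>
    intro l b bp _ hlen hk
    match l with
    | [] => simp at hk
    | x :: t =>
      by_cases hk0 : k = 0
      · subst hk0
        have heq : ((b.length : Int) + 1) = bs := by rw [← hn]; omega
        simp [List.foldl_cons, pvStepA, heq]
      · have hne : ((b ++ [x]).length : Int) ≠ bs := by
          rw [← hn]
          simp only [List.length_append, List.length_cons, List.length_nil] at *
          omega
        simp only [List.foldl_cons, pvStepA, if_neg hne]
        rw [ih t (b ++ [x]) bp (by omega) (by simp at hlen ⊢; omega)
            (by simp at hk; omega)]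
        simp

-- A's whole loop + tail flush computes the reference chunking
theorem pvA_main (bs : Int) (n : Nat) (hn : (n : Int) = bs) (hn1 : 1 ≤ n) :
    ∀ (N : Nat) (l : List (List Int × List Int)) bp, l.length ≤ N →
      (let st := l.foldl (pvStepA bs) ([], bp);
       if 0 < st.1.length then st.2 ++ [pvUnzipA st.1] else st.2)
        = bp ++ pvChunks n l := by
  intro N
  induction N with
  | zero =>
    intro l bp hl
    have : l = [] := List.eq_nil_of_length_eq_zero (by omega)
    subst this
    simp [pvChunks]
  | succ N ih =>
    intro l bp hl
    by_cases hsh : l.length < n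
    · rw [pvA_no_flush bs n hn l [] bp (by simpa using hsh)]
      match l with
      | [] => simp [pvChunks]
      | x :: t =>
        have h1 : ¬(x :: t = [] ∨ n = 0) := by simp; omega
        rw [pvChunks, dif_neg h1]
        have htake : (x :: t).take n = x :: t := List.take_of_length_le (by omega)
        have hdrop : (x :: t).drop n = [] := List.drop_eq_nil_of_le (by omega)
        simp [htake, hdrop, pvChunks, pvUnzipA_eq]
    · rw [Nat.not_lt] at hsh
      have hlne : l ≠ [] := by intro h; subst h; simp at hsh; omega
      rw [pvA_flush bs n hn n l [] bp hn1 (by simp) hsh]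
      rw [ih (l.drop n) (bp ++ [pvUnzipA (List.nil ++ l.take n)])
          (by rw [List.length_drop]; omega)]
      have hunf : pvChunks n l
          = ((l.take n).map Prod.fst, (l.take n).map Prod.snd) :: pvChunks n (l.drop n) := by
        rw [pvChunks, dif_neg (by simp [hlne]; omega)]
      rw [hunf]
      simp [pvUnzipA_eq]
  
-- B's slice loop computes the reference chunking
theorem pvB_main (bs : Int) (n : Nat) (hn : (n : Int) = bs) (hn1 : 1 ≤ n) :
    ∀ (f : Nat) (l : List (List Int × List Int)) acc, l.length ≤ f →
      pvChunkLoop f bs l acc = acc ++ pvChunks n l := by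
  intro f
  induction f with
  | zero =>
    intro l acc hl
    have : l = [] := List.eq_nil_of_length_eq_zero (by omega)
    subst this
    simp [pvChunkLoop, pvChunks]
  | succ f ih =>
    intro l acc hl
    by_cases hle : l = []
    · subst hle; simp [pvChunkLoop, pvChunks]
    · have h0 : (0 : Int) ≤ 0 := le_refl 0
      have hbs : (0 : Int) ≤ bs := by omega
      rw [pvChunkLoop, if_neg hle]
      have hslice1 : PySem.List.slice l (some 0) (some bs) = l.take n := by
        rw [PySem.List.slice_toNat l h0 hbs]
        simp [← hn]
      have hslice2 : PySem.List.slice l (some bs) none = l.drop n := by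
        rw [PySem.List.slice_from l hbs]
        simp [← hn]
      rw [hslice1, hslice2]
      have hrec : (l.drop n).length ≤ f := by
        rw [List.length_drop]
        have hl0 : 0 < l.length := List.length_pos_iff.mpr hle
        omega
      rw [ih (l.drop n) _ hrec]
      have hunf : pvChunks n l
          = ((l.take n).map Prod.fst, (l.take n).map Prod.snd) :: pvChunks n (l.drop n) := by
        rw [pvChunks, dif_neg (by simp [hle]; omega)]
      rw [hunf]
      simp

-- ===== VERDICT (by name: the statement is the Claim_ definition above) =====
theorem sort_pretrain_batch_spec : Claim_equal_sort_pretrain_batch := by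
  intro pool bs _ hpre
  unfold Spec_sort_pretrain_batch sort_pretrain_batch sort_pretrain_batch_alt
  have hpre' : (1 : Int) ≤ bs := hpre
  set sp := PySem.List.sorted pool (fun x => ((x.2.length : Int))) true with hsp
  have hn : ((bs.toNat : Nat) : Int) = bs := Int.toNat_of_nonneg (by omega)
  have hn1 : 1 ≤ bs.toNat := by omega
  rw [pvA_main bs bs.toNat hn hn1 sp.length sp [] le_rfl,
      pvB_main bs bs.toNat hn hn1 sp.length sp [] le_rfl]
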